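-- pv_equiv track=rewrite | github.com/Brian-Ckwu/mtl-icda-ht | utilities/data.py | convert_icds_to_indices
-- ===== SOURCE A (Python) =====
-- from typing import Iterable, List, Set, Tuple, Dict
--
-- def convert_icds_to_indices(icds: List[str], full_code: bool = True) -> List[int]:
--     # utility functions
--     def get_converted_icd(icd):
--         return str(icd) if full_code else str(icd)[:3]
--
--     def get_icd_idx_mapping():
--         icd2idx = dict()
--         for icd in icds:
--             icd = get_converted_icd(icd)
--             if icd not in icd2idx:
--                 icd2idx[icd] = len(icd2idx)
--         return icd2idx
--
--     # conversion
--     icd2idx = get_icd_idx_mapping()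
--     indices = list()
--     for icd in icds:
--         icd = get_converted_icd(icd)
--         idx = icd2idx[icd]
--         indices.append(idx)
--
--     return indices
-- ===== SOURCE B (Python) =====
-- def convert_icds_to_indices(icds, full_code=True):
--     icd2idx = {}
--     indices = []
--     for icd in icds:
--         code = str(icd) if full_code else str(icd)[:3]
--         indices.append(icd2idx.setdefault(code, len(icd2idx)))
--     return indices
-- ===== Notes on version B (the rewrite author's own statement) =====
-- stated objective: simpler
-- what changed: Fused A's two passes (build the icd->index dict, then re-scan icds looking each code up) into one incremental pass that maintains the dict and the output list together via setdefault.
import Mathlib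
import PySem

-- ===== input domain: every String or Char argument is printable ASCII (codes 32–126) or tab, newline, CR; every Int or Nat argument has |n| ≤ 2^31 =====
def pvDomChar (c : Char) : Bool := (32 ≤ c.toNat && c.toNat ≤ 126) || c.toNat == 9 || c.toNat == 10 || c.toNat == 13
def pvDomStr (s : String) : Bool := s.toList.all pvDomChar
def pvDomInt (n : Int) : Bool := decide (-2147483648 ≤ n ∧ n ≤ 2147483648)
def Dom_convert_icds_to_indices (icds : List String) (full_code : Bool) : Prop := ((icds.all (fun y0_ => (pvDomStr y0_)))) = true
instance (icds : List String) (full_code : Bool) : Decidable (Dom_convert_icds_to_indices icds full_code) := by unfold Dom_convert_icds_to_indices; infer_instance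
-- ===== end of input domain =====

-- B fuses A's two passes (build icd->index dict, then look each code up) into one
-- incremental pass maintaining the dict and the output together (setdefault); same results.


-- ===== PORT A =====
-- get_converted_icd: str(icd) if full_code else str(icd)[:3]
def pvConv (full_code : Bool) (icd : String) : String :=
  if full_code then icd else PySem.Str.slice icd none (some 3)

-- A, step for step: first build icd2idx over icds, then a second loop appending icd2idx[icd].
-- (the lookup icd2idx[icd] always hits a present key, so getD 0 is exact)
def convert_icds_to_indices (icds : List String) (full_code : Bool) : List Int :=
  let icd2idx : PySem.Dict String Int :=
    icds.foldl (fun d icd =>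
      let c := pvConv full_code icd
      if d.contains c then d else d.insert c ((d.size : Int))) PySem.Dict.empty
  icds.foldl (fun indices icd =>
      let c := pvConv full_code icd
      indices ++ [icd2idx.getD c 0]) []

-- ===== PORT B =====
-- one pass: idx = icd2idx.setdefault(code, len(icd2idx)); indices.append(idx)
def convert_icds_to_indices_alt (icds : List String) (full_code : Bool) : List Int :=
  (icds.foldl (fun (st : PySem.Dict String Int × List Int) icd =>
      let code := pvConv full_code icd
      let idx : Int := (st.1.get? code).getD ((st.1.size : Int))
      (st.1.setdefault code ((st.1.size : Int)), st.2 ++ [idx]))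
    (PySem.Dict.empty, [])).2

-- ===== PRECONDITION & SPEC =====
def Spec_convert_icds_to_indices (icds : List String) (full_code : Bool) (out : List Int) : Prop := out = convert_icds_to_indices_alt icds full_code
instance (icds : List String) (full_code : Bool) (out : List Int) : Decidable (Spec_convert_icds_to_indices icds full_code out) := by unfold Spec_convert_icds_to_indices; infer_instance

-- ===== CLAIM (what is proved, stated in full; the proofs are below) =====
def Claim_equal_convert_icds_to_indices : Prop := ∀ (icds : List String) (full_code : Bool), Dom_convert_icds_to_indices icds full_code → Spec_convert_icds_to_indices icds full_code (convert_icds_to_indices icds full_code)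

-- ===== LEMMAS AND PROOFS =====

-- A's dict-building step, parameterised by the code map f
def pvStepD (f : String → String) (d : PySem.Dict String Int) (c : String) : PySem.Dict String Int :=
  if d.contains (f c) then d else d.insert (f c) ((d.size : Int))

-- an existing binding survives the whole build loop (only absent keys are ever inserted)
lemma pvGet?_foldl_build (f : String → String) (cs : List String) (d : PySem.Dict String Int)
    (k : String) (v : Int) (h : d.get? k = some v) :
    (cs.foldl (pvStepD f) d).get? k = some v := by
  induction cs generalizing d with
  | nil => simpa using h
  | cons c cs ih =>
    apply ih
    unfold pvStepD
    split_ifs with hc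
    · exact h
    · rcases eq_or_ne k (f c) with rfl | hne
      · rw [PySem.Dict.contains_eq_isSome_get?, h] at hc; simp at hc
      · rw [PySem.Dict.get?_insert_of_ne _ _ hne]; exact h

-- one-pass fold from state (d, acc) = acc ++ lookups of the final dict built from d
lemma pvOnepass_eq (f : String → String) (cs : List String) (d : PySem.Dict String Int)
    (acc : List Int) :
    (cs.foldl (fun (st : PySem.Dict String Int × List Int) icd =>
        (st.1.setdefault (f icd) ((st.1.size : Int)),
         st.2 ++ [((st.1.get? (f icd)).getD ((st.1.size : Int)))])) (d, acc)).2
    = acc ++ cs.map (fun c => (cs.foldl (pvStepD f) d).getD (f c) 0) := by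
  induction cs generalizing d acc with
  | nil => simp
  | cons c cs ih =>
    simp only [List.foldl_cons, List.map_cons]
    by_cases hc : d.contains (f c)
    · obtain ⟨v, hv⟩ : ∃ v, d.get? (f c) = some v := by
        rw [PySem.Dict.contains_eq_isSome_get?] at hc
        exact Option.isSome_iff_exists.mp hc
      have hsd : d.setdefault (f c) ((d.size : Int)) = d := by
        simp [PySem.Dict.setdefault_of_contains, hc]
      have hstep : pvStepD f d c = d := by simp [pvStepD, hc]
      rw [hsd, ih]
      have hfin : (cs.foldl (pvStepD f) d).getD (f c) 0 = v := by
        have hg := pvGet?_foldl_build f cs d _ v hv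
        rw [PySem.Dict.getD_eq_get?_getD, hg]; rfl
      simp [hstep, hfin, hv]
    · have hget : d.get? (f c) = none := by
        rw [PySem.Dict.get?_eq_none_iff_contains]; simpa using hc
      have hsd : d.setdefault (f c) ((d.size : Int)) = d.insert (f c) ((d.size : Int)) := by
        simp [PySem.Dict.setdefault_of_not_contains, hc]
      have hstep : pvStepD f d c = d.insert (f c) ((d.size : Int)) := by
        simp [pvStepD, hc]
      rw [hsd, ih]
      have hfin : (cs.foldl (pvStepD f) (d.insert (f c) ((d.size : Int)))).getD (f c) 0
          = (d.size : Int) := by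
        have hg := pvGet?_foldl_build f cs (d.insert (f c) ((d.size : Int))) (f c)
          ((d.size : Int)) (PySem.Dict.get?_insert_self _ _ _)
        rw [PySem.Dict.getD_eq_get?_getD, hg]; rfl
      simp [hstep, hget, hfin]

-- ===== VERDICT (by name: the statement is the Claim_ definition above) =====
theorem convert_icds_to_indices_spec : Claim_equal_convert_icds_to_indices := by
  intro icds full_code _
  unfold Spec_convert_icds_to_indices convert_icds_to_indices convert_icds_to_indices_alt
  rw [pvOnepass_eq (pvConv full_code) icds PySem.Dict.empty []]
  rw [PySem.List.foldl_append_singleton_eq_map]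
  rfl
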